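-- pv_equiv track=rewrite | github.com/jungokasai/graph_parser | analysis/utils/analyzer.py | rel_type
-- ===== SOURCE A (Python) =====
-- def rel_type(gold_arcs, gold_rels, predicted_arcs, predicted_rels):
--     rec_correct = {}
--     rec_total = {}
--     prec_correct = {}
--     prec_total = {}
--     for sent_idx in range(len(gold_arcs)):
--         gold_arcs_sent = gold_arcs[sent_idx]
--         gold_rels_sent = gold_rels[sent_idx]
--         predicted_arcs_sent = predicted_arcs[sent_idx]
--         predicted_rels_sent = predicted_rels[sent_idx]
--         for word_idx in range(len(gold_arcs_sent)):
--             gold_arc = int(gold_arcs_sent[word_idx])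
--             gold_rel = gold_rels_sent[word_idx]
--             predicted_rel = predicted_rels_sent[word_idx]
--             predicted_arc = int(predicted_arcs_sent[word_idx])
--             rec_distance = gold_rel
--             prec_distance = predicted_rel
--             if rec_distance in rec_correct.keys():
--                 rec_total[rec_distance] += 1
--                 if gold_arc == predicted_arc:
--                     rec_correct[rec_distance] += 1
--             else:
--                 rec_total[rec_distance] = 1
--                 rec_correct[rec_distance] = 0
--                 if gold_arc == predicted_arc:
--                     rec_correct[rec_distance] += 1
--             if prec_distance in prec_correct.keys():
--                 prec_total[prec_distance] += 1
--                 if gold_arc == predicted_arc: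
--                     prec_correct[prec_distance] += 1
--             else:
--                 prec_total[prec_distance] = 1
--                 prec_correct[prec_distance] = 0
--                 if gold_arc == predicted_arc:
--                     prec_correct[prec_distance] += 1
--     #accuracies = {}
--     #for length in correct.keys():
--     #    accuracies[length] = float(correct[length])/total[length]
--     return rec_total, rec_correct, prec_total, prec_correct
-- ===== SOURCE B (Python) =====
-- def rel_type(gold_arcs, gold_rels, predicted_arcs, predicted_rels):
--     flat = []
--     for gas, grs, pas, prs in zip(gold_arcs, gold_rels, predicted_arcs, predicted_rels):
--         for ga, gr, pa, pr in zip(gas, grs, pas, prs):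
--             flat.append((gr, pr, int(ga) == int(pa)))
--
--     def group(pairs):
--         total = {}
--         for k, _ in pairs:
--             total[k] = total.get(k, 0) + 1
--         correct = {k: 0 for k in total}
--         for k, m in pairs:
--             if m:
--                 correct[k] += 1
--         return total, correct
--
--     rec_total, rec_correct = group([(g, m) for g, _, m in flat])
--     prec_total, prec_correct = group([(p, m) for _, p, m in flat])
--     return rec_total, rec_correct, prec_total, prec_correct
-- ===== Notes on version B (the rewrite author's own statement) =====
-- stated objective: simpler
-- what changed: Replaces A's single branchy pass that updates four dicts per position with in/else branches by flattening all positions to (gold_rel, pred_rel, match) triples and a grouped-counting helper per key sequence: one counting pass for the totals, a zero-seeding comprehension over its keys, and one adding pass for the corrects.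
import Mathlib
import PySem

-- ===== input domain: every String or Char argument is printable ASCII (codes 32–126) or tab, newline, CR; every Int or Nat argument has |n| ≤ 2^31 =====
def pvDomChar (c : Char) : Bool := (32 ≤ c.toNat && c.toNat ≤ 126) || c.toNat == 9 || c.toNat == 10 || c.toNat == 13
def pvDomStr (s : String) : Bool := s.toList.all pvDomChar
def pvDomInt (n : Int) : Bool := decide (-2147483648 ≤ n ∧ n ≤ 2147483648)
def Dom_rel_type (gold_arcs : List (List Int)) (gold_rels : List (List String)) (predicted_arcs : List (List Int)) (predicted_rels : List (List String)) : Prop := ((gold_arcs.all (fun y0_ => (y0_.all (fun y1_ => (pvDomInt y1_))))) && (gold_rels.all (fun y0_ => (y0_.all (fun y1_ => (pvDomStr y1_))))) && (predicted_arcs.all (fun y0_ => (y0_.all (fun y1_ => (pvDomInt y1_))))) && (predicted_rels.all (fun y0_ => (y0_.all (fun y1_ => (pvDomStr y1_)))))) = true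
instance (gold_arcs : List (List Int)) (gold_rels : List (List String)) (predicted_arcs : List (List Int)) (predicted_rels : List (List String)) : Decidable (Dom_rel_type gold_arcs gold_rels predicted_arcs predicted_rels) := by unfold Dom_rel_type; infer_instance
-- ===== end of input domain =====

-- B replaces A's single branchy four-dict accumulation pass by flattening all positions and counting per
-- first-occurrence label (objective: simpler grouped-counting decomposition; same results, not faster).

-- ===== PORT A =====
-- A-side helper: the body of A's inner loop (one word position updating the four dicts
-- (rec_total, rec_correct, prec_total, prec_correct); 'd[k] += 1' is Dict.modify k 0 (· + 1)).
def relTypeWordStep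
    (st : PySem.Dict String Int × PySem.Dict String Int × PySem.Dict String Int × PySem.Dict String Int)
    (gold_arc : Int) (gold_rel : String) (predicted_rel : String) (predicted_arc : Int) :
    PySem.Dict String Int × PySem.Dict String Int × PySem.Dict String Int × PySem.Dict String Int :=
  ( (if st.2.1.contains gold_rel then st.1.modify gold_rel 0 (· + 1) else st.1.insert gold_rel 1)
  , (if st.2.1.contains gold_rel then
       (if gold_arc == predicted_arc then st.2.1.modify gold_rel 0 (· + 1) else st.2.1)
     else
       (if gold_arc == predicted_arc then (st.2.1.insert gold_rel 0).modify gold_rel 0 (· + 1)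
        else st.2.1.insert gold_rel 0))
  , (if st.2.2.2.contains predicted_rel then st.2.2.1.modify predicted_rel 0 (· + 1) else st.2.2.1.insert predicted_rel 1)
  , (if st.2.2.2.contains predicted_rel then
       (if gold_arc == predicted_arc then st.2.2.2.modify predicted_rel 0 (· + 1) else st.2.2.2)
     else
       (if gold_arc == predicted_arc then (st.2.2.2.insert predicted_rel 0).modify predicted_rel 0 (· + 1)
        else st.2.2.2.insert predicted_rel 0)) )

def rel_type (gold_arcs : List (List Int)) (gold_rels : List (List String)) (predicted_arcs : List (List Int)) (predicted_rels : List (List String)) : (List (String × Int)) × (List (String × Int)) × (List (String × Int)) × (List (String × Int)) :=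
  let st :=
    (List.range gold_arcs.length).foldl (fun st sent_idx =>
      let gold_arcs_sent := gold_arcs.getD sent_idx []
      let gold_rels_sent := gold_rels.getD sent_idx []
      let predicted_arcs_sent := predicted_arcs.getD sent_idx []
      let predicted_rels_sent := predicted_rels.getD sent_idx []
      (List.range gold_arcs_sent.length).foldl (fun st word_idx =>
        relTypeWordStep st (gold_arcs_sent.getD word_idx 0) (gold_rels_sent.getD word_idx "")
          (predicted_rels_sent.getD word_idx "") (predicted_arcs_sent.getD word_idx 0)) st)
      ((PySem.Dict.empty : PySem.Dict String Int), (PySem.Dict.empty : PySem.Dict String Int),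
       (PySem.Dict.empty : PySem.Dict String Int), (PySem.Dict.empty : PySem.Dict String Int))
  (st.1.items, st.2.1.items, st.2.2.1.items, st.2.2.2.items)

-- ===== PORT B =====
-- B-side helper: grouped counting for one key sequence of (label, match) pairs:
-- one counting pass for the totals, a zero-seeding comprehension, one adding pass for the corrects.
def rtGroup (pairs : List (String × Bool)) : (List (String × Int)) × (List (String × Int)) :=
  let total := pairs.foldl (fun d q => d.modify q.1 0 (· + 1)) (PySem.Dict.empty : PySem.Dict String Int)
  let correct0 := total.keys.foldl (fun d k => d.insert k 0) (PySem.Dict.empty : PySem.Dict String Int)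
  let correct := pairs.foldl (fun d q => if q.2 then d.modify q.1 0 (· + 1) else d) correct0
  (total.items, correct.items)

def rel_type_alt (gold_arcs : List (List Int)) (gold_rels : List (List String)) (predicted_arcs : List (List Int)) (predicted_rels : List (List String)) : (List (String × Int)) × (List (String × Int)) × (List (String × Int)) × (List (String × Int)) :=
  let flat := ((gold_arcs.zip gold_rels).zip (predicted_arcs.zip predicted_rels)).flatMap (fun s =>
    ((s.1.1.zip s.1.2).zip (s.2.1.zip s.2.2)).map (fun w => (w.1.2, w.2.2, w.1.1 == w.2.1)))
  let rec_ := rtGroup (flat.map (fun t => (t.1, t.2.2)))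
  let prec_ := rtGroup (flat.map (fun t => (t.2.1, t.2.2)))
  (rec_.1, rec_.2, prec_.1, prec_.2)

-- ===== PRECONDITION & SPEC =====
-- Pre_ excludes exactly the inputs on which A raises IndexError: a sentence index (taken from
-- gold_arcs) missing from one of the other three outer lists, or a word index (taken from the
-- gold-arcs sentence) missing from one of the other three corresponding inner lists.
def Pre_rel_type (gold_arcs : List (List Int)) (gold_rels : List (List String)) (predicted_arcs : List (List Int)) (predicted_rels : List (List String)) : Prop :=
  gold_arcs.length ≤ gold_rels.length ∧ gold_arcs.length ≤ predicted_arcs.length ∧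
  gold_arcs.length ≤ predicted_rels.length ∧
  ∀ i : Fin gold_arcs.length,
    (gold_arcs.get i).length ≤ (gold_rels.getD i.1 []).length ∧
    (gold_arcs.get i).length ≤ (predicted_arcs.getD i.1 []).length ∧
    (gold_arcs.get i).length ≤ (predicted_rels.getD i.1 []).length
instance (gold_arcs : List (List Int)) (gold_rels : List (List String)) (predicted_arcs : List (List Int)) (predicted_rels : List (List String)) : Decidable (Pre_rel_type gold_arcs gold_rels predicted_arcs predicted_rels) := by unfold Pre_rel_type; infer_instance
def pvWitness_rel_type : List (List Int) × List (List String) × List (List Int) × List (List String) :=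
  ([[1, 2], [0]], [["nsubj", "obj"], ["det"]], [[1, 3], [0]], [["nsubj", "det"], ["det"]])

def Spec_rel_type (gold_arcs : List (List Int)) (gold_rels : List (List String)) (predicted_arcs : List (List Int)) (predicted_rels : List (List String)) (out : (List (String × Int)) × (List (String × Int)) × (List (String × Int)) × (List (String × Int))) : Prop := out = rel_type_alt gold_arcs gold_rels predicted_arcs predicted_rels
instance (gold_arcs : List (List Int)) (gold_rels : List (List String)) (predicted_arcs : List (List Int)) (predicted_rels : List (List String)) (out : (List (String × Int)) × (List (String × Int)) × (List (String × Int)) × (List (String × Int))) : Decidable (Spec_rel_type gold_arcs gold_rels predicted_arcs predicted_rels out) := by unfold Spec_rel_type; infer_instance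

-- ===== CLAIM (what is proved, stated in full; the proofs are below) =====
def Claim_equal_rel_type : Prop := ∀ (gold_arcs : List (List Int)) (gold_rels : List (List String)) (predicted_arcs : List (List Int)) (predicted_rels : List (List String)), Dom_rel_type gold_arcs gold_rels predicted_arcs predicted_rels → Pre_rel_type gold_arcs gold_rels predicted_arcs predicted_rels → Spec_rel_type gold_arcs gold_rels predicted_arcs predicted_rels (rel_type gold_arcs gold_rels predicted_arcs predicted_rels)

-- ===== LEMMAS AND PROOFS =====

-- the total- and correct-count dicts that A's loop has built after the (label, match) pairs l
def shapeT (l : List (String × Bool)) : PySem.Dict String Int :=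
  ⟨(PySem.List.dedup (l.map (·.1))).map (fun k => (k, (l.countP (fun q => q.1 == k) : Int)))⟩
def shapeC (l : List (String × Bool)) : PySem.Dict String Int :=
  ⟨(PySem.List.dedup (l.map (·.1))).map (fun k => (k, (l.countP (fun q => q.1 == k && q.2) : Int)))⟩

lemma keys_shapeT (l : List (String × Bool)) : (shapeT l).keys = PySem.List.dedup (l.map (·.1)) := by
  simp [shapeT, PySem.Dict.keys, List.map_map, Function.comp_def]

lemma keys_shapeC (l : List (String × Bool)) : (shapeC l).keys = PySem.List.dedup (l.map (·.1)) := by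
  simp [shapeC, PySem.Dict.keys, List.map_map, Function.comp_def]

lemma contains_shapeT (l : List (String × Bool)) (k : String) :
    (shapeT l).contains k = decide (k ∈ l.map (·.1)) := by
  simp only [shapeT, PySem.Dict.contains_mk, List.any_map, Function.comp_def, List.any_beq', List.contains_eq_mem, PySem.List.mem_dedup]

lemma contains_shapeC (l : List (String × Bool)) (k : String) :
    (shapeC l).contains k = decide (k ∈ l.map (·.1)) := by
  simp only [shapeC, PySem.Dict.contains_mk, List.any_map, Function.comp_def, List.any_beq', List.contains_eq_mem, PySem.List.mem_dedup]

lemma getD_shapeT (l : List (String × Bool)) (k : String) (h : k ∈ l.map (·.1)) :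
    (shapeT l).getD k 0 = (l.countP (fun q => q.1 == k) : Int) := by
  refine PySem.Dict.getD_of_mem_items _ ?_ ?_ 0
  · exact List.mem_map.mpr ⟨k, by simpa [PySem.Set.mem_ofList] using h, rfl⟩
  · rw [keys_shapeT]; simpa using PySem.List.nodup_dedup (l.map (·.1))

lemma getD_shapeC (l : List (String × Bool)) (k : String) (h : k ∈ l.map (·.1)) :
    (shapeC l).getD k 0 = (l.countP (fun q => q.1 == k && q.2) : Int) := by
  refine PySem.Dict.getD_of_mem_items _ ?_ ?_ 0
  · exact List.mem_map.mpr ⟨k, by simpa [PySem.Set.mem_ofList] using h, rfl⟩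
  · rw [keys_shapeC]; simpa using PySem.List.nodup_dedup (l.map (·.1))

-- appending one (label, match) pair to the processed prefix updates the two shaped dicts the way
-- A's branches do
lemma shapeT_snoc_mem (l : List (String × Bool)) (k : String) (m : Bool) (h : k ∈ l.map (·.1)) :
    shapeT (l ++ [(k, m)]) = (shapeT l).modify k 0 (· + 1) := by
  have hk : k ∈ PySem.Set.ofList (l.map (·.1)) := by
    simpa [PySem.Set.mem_ofList] using h
  have hc : (shapeT l).contains k = true := by rw [contains_shapeT]; simpa using h
  apply PySem.Dict.ext
  rw [PySem.Dict.modify, PySem.Dict.items_insert_of_contains _ _ hc, getD_shapeT l k h]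
  simp only [shapeT, List.map_append, List.map_cons, List.map_nil,
    PySem.List.dedup_eq_ofList, PySem.Set.ofList_append_singleton, PySem.Set.add_of_mem hk,
    List.map_map]
  refine (List.map_congr_left ?_).symm
  intro k' hk'
  by_cases hkk : k' = k
  · subst hkk; simp [List.countP_append]
  · simp [Function.comp_def, hkk, List.countP_append,
      show (k == k') = false from by simpa using Ne.symm hkk]

lemma shapeC_snoc_mem (l : List (String × Bool)) (k : String) (m : Bool) (h : k ∈ l.map (·.1)) :
    shapeC (l ++ [(k, m)]) = if m then (shapeC l).modify k 0 (· + 1) else shapeC l := by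
  have hk : k ∈ PySem.Set.ofList (l.map (·.1)) := by
    simpa [PySem.Set.mem_ofList] using h
  have hc : (shapeC l).contains k = true := by rw [contains_shapeC]; simpa using h
  cases m with
  | true =>
    apply PySem.Dict.ext
    rw [if_pos rfl, PySem.Dict.modify, PySem.Dict.items_insert_of_contains _ _ hc, getD_shapeC l k h]
    simp only [shapeC, List.map_append, List.map_cons, List.map_nil,
      PySem.List.dedup_eq_ofList, PySem.Set.ofList_append_singleton, PySem.Set.add_of_mem hk,
      List.map_map]
    refine (List.map_congr_left ?_).symm
    intro k' hk'
    by_cases hkk : k' = k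
    · subst hkk; simp [List.countP_append]
    · simp [Function.comp_def, hkk, List.countP_append,
        show (k == k') = false from by simpa using Ne.symm hkk]
  | false =>
    apply PySem.Dict.ext
    rw [if_neg (by simp)]
    simp only [shapeC, List.map_append, List.map_cons, List.map_nil,
      PySem.List.dedup_eq_ofList, PySem.Set.ofList_append_singleton, PySem.Set.add_of_mem hk]
    refine List.map_congr_left ?_
    intro k' hk'
    simp [List.countP_append]

lemma shapeT_snoc_not_mem (l : List (String × Bool)) (k : String) (m : Bool) (h : k ∉ l.map (·.1)) :
    shapeT (l ++ [(k, m)]) = (shapeT l).insert k 1 := by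
  have hk : k ∉ PySem.Set.ofList (l.map (·.1)) := by
    simpa [PySem.Set.mem_ofList] using h
  have hc : (shapeT l).contains k = false := by
    rw [contains_shapeT]; simpa using h
  apply PySem.Dict.ext
  rw [PySem.Dict.items_insert_of_not_contains _ _ hc]
  simp only [shapeT, List.map_append, List.map_cons, List.map_nil,
    PySem.List.dedup_eq_ofList, PySem.Set.ofList_append_singleton, PySem.Set.add_of_not_mem hk,
    List.map_append]
  congr 1
  · refine List.map_congr_left ?_
    intro k' hk'
    have hkk : k' ≠ k := fun e => hk (e ▸ hk')
    simp [List.countP_append, show (k == k') = false from by simpa using Ne.symm hkk]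
  · have : l.countP (fun q => q.1 == k) = 0 := by
      rw [List.countP_eq_zero]
      intro q hq e
      exact h (List.mem_map.mpr ⟨q, hq, by simpa using e⟩)
    simp [this, List.countP_append]

lemma shapeC_snoc_not_mem (l : List (String × Bool)) (k : String) (m : Bool) (h : k ∉ l.map (·.1)) :
    shapeC (l ++ [(k, m)]) = if m then ((shapeC l).insert k 0).modify k 0 (· + 1) else (shapeC l).insert k 0 := by
  have hk : k ∉ PySem.Set.ofList (l.map (·.1)) := by
    simpa [PySem.Set.mem_ofList] using h
  have hc : (shapeC l).contains k = false := by
    rw [contains_shapeC]; simpa using h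
  have hins : (if m then ((shapeC l).insert k 0).modify k 0 (· + 1) else (shapeC l).insert k 0)
      = (shapeC l).insert k (if m then 1 else 0) := by
    cases m with
    | true =>
      rw [if_pos rfl, if_pos rfl, PySem.Dict.modify, PySem.Dict.getD_insert_self,
        PySem.Dict.insert_insert_self]
      norm_num
    | false => simp
  rw [hins]
  apply PySem.Dict.ext
  rw [PySem.Dict.items_insert_of_not_contains _ _ hc]
  simp only [shapeC, List.map_append, List.map_cons, List.map_nil,
    PySem.List.dedup_eq_ofList, PySem.Set.ofList_append_singleton, PySem.Set.add_of_not_mem hk,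
    List.map_append]
  congr 1
  · refine List.map_congr_left ?_
    intro k' hk'
    have hkk : k' ≠ k := fun e => hk (e ▸ hk')
    simp [List.countP_append, show (k == k') = false from by simpa using Ne.symm hkk]
  · have : l.countP (fun q => q.1 == k && q.2) = 0 := by
      rw [List.countP_eq_zero]
      intro q hq e
      exact h (List.mem_map.mpr ⟨q, hq, by simpa using (Bool.and_eq_true_iff.mp e).1⟩)
    cases m <;> simp [this, List.countP_append]

-- A's word loop over a flat list of (gold_rel, predicted_rel, match) triples builds the shapes
lemma foldl_step_shape (L : List (String × String × Bool)) :
    L.foldl (fun st t => relTypeWordStep st 0 t.1 t.2.1 (if t.2.2 then 0 else 1))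
        (PySem.Dict.empty, PySem.Dict.empty, PySem.Dict.empty, PySem.Dict.empty)
      = (shapeT (L.map fun t => (t.1, t.2.2)), shapeC (L.map fun t => (t.1, t.2.2)),
         shapeT (L.map fun t => (t.2.1, t.2.2)), shapeC (L.map fun t => (t.2.1, t.2.2))) := by
  induction L using List.reverseRecOn with
  | nil => rfl
  | append_singleton L t ih =>
    obtain ⟨g, p, m⟩ := t
    rw [List.foldl_append, ih]
    have h1 : (L.map fun t => (t.1, t.2.2)).map (·.1) = L.map (·.1) := by
      simp [List.map_map, Function.comp_def]
    have h2 : (L.map fun t => (t.2.1, t.2.2)).map (·.1) = L.map (·.2.1) := by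
      simp [List.map_map, Function.comp_def]
    have harc : ((0 : Int) == (if m then 0 else 1)) = m := by cases m <;> simp
    simp only [List.foldl_cons, List.foldl_nil, relTypeWordStep, harc,
      contains_shapeC, h1, h2, List.map_append, List.map_cons, List.map_nil]
    by_cases hg : g ∈ L.map (·.1) <;> by_cases hp : p ∈ L.map (·.2.1)
    all_goals {
      refine Prod.ext ?_ (Prod.ext ?_ (Prod.ext ?_ ?_)) <;>
        simp only [hg, hp, decide_true, decide_false, if_true, if_false] <;>
        (first
          | (rw [shapeT_snoc_mem _ _ m (by rw [h1]; exact hg)])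
          | (rw [shapeC_snoc_mem _ _ m (by rw [h1]; exact hg)])
          | (rw [shapeT_snoc_mem _ _ m (by rw [h2]; exact hp)])
          | (rw [shapeC_snoc_mem _ _ m (by rw [h2]; exact hp)])
          | (rw [shapeT_snoc_not_mem _ _ m (by rw [h1]; exact hg)])
          | (rw [shapeC_snoc_not_mem _ _ m (by rw [h1]; exact hg)])
          | (rw [shapeT_snoc_not_mem _ _ m (by rw [h2]; exact hp)])
          | (rw [shapeC_snoc_not_mem _ _ m (by rw [h2]; exact hp)])) <;>
        try simp
    }

-- a fold over range(len as) reading four parallel lists by index is a fold over the zipped lists,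
-- provided as is the shortest
lemma foldl_range_getD₄ {α β γ δ ε : Type} (f : ε → α → β → γ → δ → ε)
    (as : List α) (bs : List β) (cs : List γ) (ds : List δ) (da : α) (db : β) (dc : γ) (dd : δ)
    (init : ε) (h1 : as.length ≤ bs.length) (h2 : as.length ≤ cs.length) (h3 : as.length ≤ ds.length) :
    (List.range as.length).foldl
        (fun st i => f st (as.getD i da) (bs.getD i db) (cs.getD i dc) (ds.getD i dd)) init
      = ((as.zip bs).zip (cs.zip ds)).foldl (fun st x => f st x.1.1 x.1.2 x.2.1 x.2.2) init := by
  induction as generalizing bs cs ds init with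
  | nil => simp
  | cons a as ih =>
    cases bs with
    | nil => simp at h1
    | cons b bs =>
      cases cs with
      | nil => simp at h2
      | cons c cs =>
        cases ds with
        | nil => simp at h3
        | cons d ds =>
          simp only [List.length_cons, List.range_succ_eq_map, List.foldl_cons, List.foldl_map,
            List.getD_cons_zero, List.getD_cons_succ, List.zip_cons_cons]
          exact ih bs cs ds _ (by simpa using h1) (by simpa using h2) (by simpa using h3)

lemma count_map_fst (l : List (String × Bool)) (k : String) :
    (l.map (·.1)).count k = l.countP (fun q => q.1 == k) := by
  simp [List.count, List.countP_map, Function.comp_def]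

-- B's grouped counting builds exactly the dicts A's loop has built
lemma rtGroup_eq_shape (l : List (String × Bool)) :
    rtGroup l = ((shapeT l).items, (shapeC l).items) := by
  have htotal : l.foldl (fun d q => d.modify q.1 0 (· + 1)) (PySem.Dict.empty : PySem.Dict String Int)
      = shapeT l := by
    have hcnt : l.foldl (fun d q => d.modify q.1 0 (· + 1)) (PySem.Dict.empty : PySem.Dict String Int)
        = PySem.Dict.counter (l.map (·.1)) := by
      rw [PySem.Dict.counter_eq_foldl, List.foldl_map]
    rw [hcnt]
    apply PySem.Dict.ext
    rw [PySem.Dict.items_counter]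
    simp only [shapeT, PySem.List.dedup_eq_ofList]
    refine List.map_congr_left ?_
    intro k _
    rw [count_map_fst]
  have hkeys0 : (shapeT l).keys = PySem.List.dedup (l.map (·.1)) := keys_shapeT l
  have hnd0 : (shapeT l).keys.Nodup := by
    rw [hkeys0]; simpa using PySem.List.nodup_dedup (l.map (·.1))
  have hseed : ((shapeT l).keys.foldl (fun d k => d.insert k 0) (PySem.Dict.empty : PySem.Dict String Int)).items
      = (shapeT l).keys.map (fun k => (k, (0 : Int))) := by
    refine PySem.Dict.items_foldl_insert_fresh _ _ _ _ ?_ ?_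
    · intro a _; simp [PySem.Dict.contains_empty]
    · simpa using hnd0
  set seed := (shapeT l).keys.foldl (fun d k => d.insert k 0) (PySem.Dict.empty : PySem.Dict String Int) with hseeddef
  have hseedkeys : seed.keys = (shapeT l).keys := by
    rw [PySem.Dict.keys, hseed]; simp [Function.comp_def]
  have hcorrect : l.foldl (fun d q => if q.2 then d.modify q.1 0 (· + 1) else d) seed = shapeC l := by
    rw [PySem.List.foldl_ite_eq_foldl_filter]
    simp only [Bool.decide_eq_true]
    rw [← List.foldl_map (f := fun q : String × Bool => q.1)
      (g := fun (d : PySem.Dict String Int) x => d.modify x 0 (· + 1))]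
    apply PySem.Dict.ext
    have hk : (((l.filter (·.2)).map (·.1)).foldl (fun d x => d.modify x 0 (· + 1)) seed).keys
        = seed.keys := by
      rw [PySem.Dict.keys_foldl_modify, PySem.Set.update_eq_append_filter]
      rw [List.filter_eq_nil_iff.mpr, List.append_nil]
      intro y hy
      have hmem : y ∈ l.map (·.1) := by
        have := (PySem.Set.mem_ofList _ _).mp hy
        obtain ⟨q, hq, rfl⟩ := List.mem_map.mp this
        exact List.mem_map.mpr ⟨q, List.mem_of_mem_filter hq, rfl⟩
      simp only [PySem.Set.contains_eq_listContains, hseedkeys, hkeys0, Bool.not_eq_true',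
        List.contains_eq_mem, decide_eq_false_iff_not]
      simp [PySem.List.mem_dedup, hmem]
    have hknd : (((l.filter (·.2)).map (·.1)).foldl (fun d x => d.modify x 0 (· + 1)) seed).keys.Nodup := by
      rw [hk, hseedkeys]; exact hnd0
    rw [PySem.Dict.items_eq_map_keys _ hknd 0, hk, hseedkeys, hkeys0]
    simp only [shapeC, PySem.Dict.items]
    refine List.map_congr_left ?_
    intro k hkmem
    have hgd : (((l.filter (·.2)).map (·.1)).foldl (fun d x => d.modify x 0 (· + 1)) seed).getD k 0
        = seed.getD k 0 + (((l.filter (·.2)).map (·.1)).count k : Int) :=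
      PySem.Dict.getD_foldl_modify_add_one _ _ _
    have hsgd : seed.getD k 0 = 0 := by
      refine PySem.Dict.getD_of_mem_items seed (v := 0) ?_ (by rw [hseedkeys]; exact hnd0) 0
      rw [hseed]
      exact List.mem_map.mpr ⟨k, by rw [hkeys0]; exact hkmem, rfl⟩
    rw [hgd, hsgd, count_map_fst, List.countP_filter]
    simp
  simp only [rtGroup]
  rw [htotal, ← hseeddef, hcorrect]

-- A's word step only reads the two arcs through their equality test
lemma wordStep_arc (st : PySem.Dict String Int × PySem.Dict String Int × PySem.Dict String Int × PySem.Dict String Int)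
    (a : Int) (b d : String) (c : Int) :
    relTypeWordStep st a b d c = relTypeWordStep st 0 b d (if a == c then 0 else 1) := by
  have harc : ((0 : Int) == (if a == c then 0 else 1)) = (a == c) := by
    by_cases h : a = c <;> simp [h]
  simp only [relTypeWordStep, harc]

-- ===== VERDICT (by name: the statement is the Claim_ definition above) =====
theorem rel_type_spec : Claim_equal_rel_type := by
  intro ga gr pa pr _ hpre
  obtain ⟨h1, h2, h3, h4⟩ := hpre
  unfold Spec_rel_type rel_type rel_type_alt
  simp only []
  rw [foldl_range_getD₄
    (f := fun st (gs : List Int) (rs : List String) (ps : List Int) (qs : List String) =>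
      (List.range gs.length).foldl (fun st word_idx =>
        relTypeWordStep st (gs.getD word_idx 0) (rs.getD word_idx "")
          (qs.getD word_idx "") (ps.getD word_idx 0)) st)
    ga gr pa pr [] [] [] [] _ h1 h2 h3]
  have hin : ∀ (st : PySem.Dict String Int × PySem.Dict String Int × PySem.Dict String Int × PySem.Dict String Int)
      (x : (List Int × List String) × (List Int × List String)),
      x ∈ (ga.zip gr).zip (pa.zip pr) →
      (List.range x.1.1.length).foldl (fun st word_idx =>
        relTypeWordStep st (x.1.1.getD word_idx 0) (x.1.2.getD word_idx "")
          (x.2.2.getD word_idx "") (x.2.1.getD word_idx 0)) st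
      = ((x.1.1.zip x.1.2).zip (x.2.1.zip x.2.2)).foldl
          (fun st w => relTypeWordStep st w.1.1 w.1.2 w.2.2 w.2.1) st := by
    intro st x hx
    obtain ⟨i, hi, hxe⟩ := List.mem_iff_getElem.mp hx
    have hlen : ((ga.zip gr).zip (pa.zip pr)).length = ga.length := by
      simp [List.length_zip]; omega
    rw [hlen] at hi
    have hig : i < gr.length := lt_of_lt_of_le hi h1
    have hip : i < pa.length := lt_of_lt_of_le hi h2
    have hiq : i < pr.length := lt_of_lt_of_le hi h3
    have hx1 : x = ((ga[i], gr[i]), (pa[i], pr[i])) := by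
      rw [← hxe]; simp [List.getElem_zip]
    obtain ⟨hl1, hl2, hl3⟩ := h4 ⟨i, hi⟩
    rw [List.getD_eq_getElem gr [] hig] at hl1
    rw [List.getD_eq_getElem pa [] hip] at hl2
    rw [List.getD_eq_getElem pr [] hiq] at hl3
    simp only [List.get_eq_getElem] at hl1 hl2 hl3
    subst hx1
    exact foldl_range_getD₄
      (f := fun st a b d c => relTypeWordStep st a b c d)
      ga[i] gr[i] pa[i] pr[i] 0 "" 0 "" st hl1 hl2 hl3
  have hA : (List.foldl (fun st (x : (List Int × List String) × (List Int × List String)) =>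
        (List.range x.1.1.length).foldl (fun st word_idx =>
          relTypeWordStep st (x.1.1.getD word_idx 0) (x.1.2.getD word_idx "")
            (x.2.2.getD word_idx "") (x.2.1.getD word_idx 0)) st)
        ((PySem.Dict.empty : PySem.Dict String Int), (PySem.Dict.empty : PySem.Dict String Int),
         (PySem.Dict.empty : PySem.Dict String Int), (PySem.Dict.empty : PySem.Dict String Int))
        ((ga.zip gr).zip (pa.zip pr)))
      = (let M := (((ga.zip gr).zip (pa.zip pr)).flatMap fun s =>
            ((s.1.1.zip s.1.2).zip (s.2.1.zip s.2.2))).map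
              (fun w => (w.1.2, w.2.2, w.1.1 == w.2.1));
         (shapeT (M.map fun t => (t.1, t.2.2)), shapeC (M.map fun t => (t.1, t.2.2)),
          shapeT (M.map fun t => (t.2.1, t.2.2)), shapeC (M.map fun t => (t.2.1, t.2.2)))) := by
    have e1 : List.foldl (fun st (x : (List Int × List String) × (List Int × List String)) =>
        (List.range x.1.1.length).foldl (fun st word_idx =>
          relTypeWordStep st (x.1.1.getD word_idx 0) (x.1.2.getD word_idx "")
            (x.2.2.getD word_idx "") (x.2.1.getD word_idx 0)) st)
        ((PySem.Dict.empty : PySem.Dict String Int), (PySem.Dict.empty : PySem.Dict String Int),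
         (PySem.Dict.empty : PySem.Dict String Int), (PySem.Dict.empty : PySem.Dict String Int))
        ((ga.zip gr).zip (pa.zip pr))
      = List.foldl (fun st x =>
          ((x.1.1.zip x.1.2).zip (x.2.1.zip x.2.2)).foldl
            (fun st w => relTypeWordStep st w.1.1 w.1.2 w.2.2 w.2.1) st)
        ((PySem.Dict.empty : PySem.Dict String Int), (PySem.Dict.empty : PySem.Dict String Int),
         (PySem.Dict.empty : PySem.Dict String Int), (PySem.Dict.empty : PySem.Dict String Int))
        ((ga.zip gr).zip (pa.zip pr)) := PySem.List.foldl_congr_mem _ _ _ _ hin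
    rw [e1, ← List.foldl_flatMap]
    have e2 : List.foldl (fun st (w : (Int × String) × Int × String) =>
          relTypeWordStep st w.1.1 w.1.2 w.2.2 w.2.1)
        ((PySem.Dict.empty : PySem.Dict String Int), (PySem.Dict.empty : PySem.Dict String Int),
         (PySem.Dict.empty : PySem.Dict String Int), (PySem.Dict.empty : PySem.Dict String Int))
        (((ga.zip gr).zip (pa.zip pr)).flatMap fun x => (x.1.1.zip x.1.2).zip (x.2.1.zip x.2.2))
      = List.foldl (fun st (w : (Int × String) × Int × String) =>
          relTypeWordStep st 0 w.1.2 w.2.2 (if w.1.1 == w.2.1 then 0 else 1))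
        ((PySem.Dict.empty : PySem.Dict String Int), (PySem.Dict.empty : PySem.Dict String Int),
         (PySem.Dict.empty : PySem.Dict String Int), (PySem.Dict.empty : PySem.Dict String Int))
        (((ga.zip gr).zip (pa.zip pr)).flatMap fun x => (x.1.1.zip x.1.2).zip (x.2.1.zip x.2.2)) :=
      PySem.List.foldl_congr_mem _ _ _ _ (fun st w _ => wordStep_arc st w.1.1 w.1.2 w.2.2 w.2.1)
    rw [e2]
    rw [← List.foldl_map (f := fun (w : (Int × String) × Int × String) => (w.1.2, w.2.2, w.1.1 == w.2.1))
      (g := fun st (t : String × String × Bool) => relTypeWordStep st 0 t.1 t.2.1 (if t.2.2 then 0 else 1))]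
    rw [foldl_step_shape]
  rw [hA]
  simp only [rtGroup_eq_shape, List.map_flatMap, List.map_map]
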